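-- pv_equiv track=rewrite | github.com/kuzichkin2001/MachineLearning | MachineLearningPractice/contest4/task1.py | sum_of_power_two_indices
-- ===== SOURCE A (Python) =====
-- def sum_of_power_two_indices(args):
--     current_del = 1
--     sum = 0
--     for i in range(0, len(args)):
--         if (i + 1) % current_del == 0:
--             sum += args[i]
--             current_del *= 2
--
--     return sum
-- ===== SOURCE B (Python) =====
-- def sum_of_power_two_indices(args):
--     n = len(args)
--     total = 0
--     idx = 0
--     while idx < n:
--         total += args[idx]
--         idx = 2 * idx + 1
--     return total
-- ===== Notes on version B (the rewrite author's own statement) =====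
-- stated objective: faster
-- what changed: Instead of scanning every index and testing divisibility by a doubling modulus, B jumps directly through the hit indices 0,1,3,7,... (idx -> 2*idx+1) in a short while loop.
import Mathlib
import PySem

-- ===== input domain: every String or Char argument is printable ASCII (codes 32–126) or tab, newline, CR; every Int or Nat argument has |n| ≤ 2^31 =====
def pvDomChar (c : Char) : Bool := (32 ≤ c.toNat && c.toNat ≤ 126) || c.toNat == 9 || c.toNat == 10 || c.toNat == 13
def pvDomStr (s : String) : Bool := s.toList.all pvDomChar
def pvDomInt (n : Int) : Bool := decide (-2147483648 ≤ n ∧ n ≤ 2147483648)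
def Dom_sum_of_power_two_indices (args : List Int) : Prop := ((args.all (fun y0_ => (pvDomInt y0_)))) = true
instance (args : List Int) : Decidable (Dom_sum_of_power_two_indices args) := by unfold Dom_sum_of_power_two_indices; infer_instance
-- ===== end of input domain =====

-- B replaces A's full O(n) scan-with-modulus by directly visiting the indices 2^k-1 (O(log n)).


-- ===== PORT A =====
-- for i in range(0, len(args)) with state (current_del, sum); args[i] is always in range,
-- ported as getD i 0.
def sum_of_power_two_indices (args : List Int) : Int :=
  ((List.range args.length).foldl
    (fun (st : Nat × Int) i =>
      if (i + 1) % st.1 == 0 then (st.1 * 2, st.2 + args.getD i 0) else st)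
    (1, 0)).2

-- ===== PORT B =====
-- while idx < n: total += args[idx]; idx = 2*idx+1
def pvBLoop (args : List Int) (idx : Nat) (total : Int) : Int :=
  if h : idx < args.length then pvBLoop args (2 * idx + 1) (total + args[idx]) else total
  termination_by args.length - idx
  decreasing_by omega

def sum_of_power_two_indices_alt (args : List Int) : Int :=
  pvBLoop args 0 0

-- ===== PRECONDITION & SPEC =====
def Spec_sum_of_power_two_indices (args : List Int) (out : Int) : Prop := out = sum_of_power_two_indices_alt args
instance (args : List Int) (out : Int) : Decidable (Spec_sum_of_power_two_indices args out) := by unfold Spec_sum_of_power_two_indices; infer_instance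

-- ===== CLAIM (what is proved, stated in full; the proofs are below) =====
def Claim_equal_sum_of_power_two_indices : Prop := ∀ (args : List Int), Dom_sum_of_power_two_indices args → Spec_sum_of_power_two_indices args (sum_of_power_two_indices args)

-- ===== LEMMAS AND PROOFS =====

-- Invariant: folding A's body over indices j, j+1, …, with current_del = cur and j ≤ cur-1,
-- yields exactly B's loop started at the next hit index cur-1.
theorem pv_key (args : List Int) :
    ∀ (m j cur : Nat) (s : Int), 0 < cur → j ≤ cur - 1 → j + m = args.length →
    ((List.range' j m).foldl
      (fun (st : Nat × Int) i =>
        if (i + 1) % st.1 == 0 then (st.1 * 2, st.2 + args.getD i 0) else st)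
      (cur, s)).2 = pvBLoop args (cur - 1) s := by
  intro m
  induction m with
  | zero =>
    intro j cur s hcur hle hlen
    rw [pvBLoop]
    simp only [List.range', List.foldl]
    rw [dif_neg (by omega)]
  | succ m ih =>
    intro j cur s hcur hle hlen
    rw [List.range'_succ, List.foldl_cons]
    by_cases hfire : (j + 1) % cur = 0
    · -- j + 1 is a multiple of cur with 0 < j+1 ≤ cur, so j = cur - 1
      have hj : j = cur - 1 := by
        rcases (Nat.dvd_of_mod_eq_zero hfire) with ⟨k, hk⟩
        have hk0 : 0 < k := by
          rcases Nat.eq_zero_or_pos k with h | h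
          · subst h; omega
          · exact h
        have hck : cur ≤ cur * k := Nat.le_mul_of_pos_right cur hk0
        omega
      rw [if_pos (by simpa using hfire)]
      rw [ih (j + 1) (cur * 2) _ (by omega) (by omega) (by omega)]
      have hlt : cur - 1 < args.length := by omega
      conv_rhs => rw [pvBLoop, dif_pos hlt]
      have hget : args.getD j 0 = args[cur - 1]'hlt := by
        subst hj
        rw [List.getD_eq_getElem?_getD, List.getElem?_eq_getElem hlt]
        rfl
      have hidx : cur * 2 - 1 = 2 * (cur - 1) + 1 := by omega
      rw [hidx, hget]
    · rw [if_neg (by simpa using hfire)]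
      have hne : j ≠ cur - 1 := by
        intro h; apply hfire; subst h
        have : cur - 1 + 1 = cur := by omega
        rw [this, Nat.mod_self]
      exact ih (j + 1) cur s hcur (by omega) (by omega)

-- ===== VERDICT (by name: the statement is the Claim_ definition above) =====
theorem sum_of_power_two_indices_spec : Claim_equal_sum_of_power_two_indices := by
  intro args _
  unfold Spec_sum_of_power_two_indices sum_of_power_two_indices sum_of_power_two_indices_alt
  rw [List.range_eq_range']
  exact pv_key args args.length 0 1 0 (by omega) (by omega) (by omega)
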